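-- pv_equiv track=rewrite | github.com/isi-metaphor/metaphor-adp-server | legacy/extractor-2014-01.py | wordStr2print
-- ===== SOURCE A (Python) =====
-- def wordStr2print(Args, word_props, Equalities):
--     output_str = ''
--
--     words = []
--     for arg in Args:
--         newwords = find_words(arg, word_props, Equalities, False)
--         for word in newwords:
--             if word not in words:
--                 words.append(word)
--
--     for word in words:
--             output_str += word + ','
--
--     if len(output_str) > 0:
--         return output_str[:-1]
--     return ''
--
-- def find_words(ARG, word_props, Equalities, is_mapping):
--     all_args = []
--     if is_mapping and ARG in Equalities:
--         all_args = Equalities[ARG].keys()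
--
--     all_args.append(ARG)
--
--     words = []
--     for arg in all_args:
--         if not arg.startswith('_') and not arg.startswith('u'):
--             for (propName, args) in word_props:
--                 if arg == args[0] and (propName.endswith('-vb') or
--                                        propName.endswith('-rb') or
--                                        propName.endswith('-adj') or
--                                        propName.endswith('-nn')):
--                     if propName.endswith('-adj'):
--                         if not propName[:-4] in words:
--                             words.append(propName[:-4])
--                     else:
--                         if not propName[:-3] in words:
--                             words.append(propName[:-3])
--                 elif len(args) > 1 and arg == args[1]:
--                     if propName.endswith('-nn'):
--                         if not propName[:-3] in words:
--                             words.append(propName[:-3])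
--                     elif propName == 'person':
--                         if 'person' not in words:
--                             words.append('person')
--                 # TODO: enable when Boxer starts working correctly
--                 # elif propName == 'subset-of' and arg == args[2]:
--                 #    output_str += ',' + find_words(args[1], word_props, Equalities, is_mapping)
--
--     if len(words) == 0 and is_mapping:
--         return [ARG]
--
--     return words
-- ===== SOURCE B (Python) =====
-- def wordStr2print(Args, word_props, Equalities):
--     # Index word_props once by argument position, then one lookup per arg.
--     index = {}
--     for propName, args in word_props:
--         if not args:
--             continue
--         if propName.endswith('-adj'):
--             stem = propName[:-4]
--         elif (propName.endswith('-vb') or propName.endswith('-rb')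
--               or propName.endswith('-nn')):
--             stem = propName[:-3]
--         else:
--             stem = None
--         if propName.endswith('-nn'):
--             secondary = propName[:-3]
--         elif propName == 'person':
--             secondary = 'person'
--         else:
--             secondary = None
--         w0 = stem if stem is not None else (
--             secondary if len(args) > 1 and args[1] == args[0] else None)
--         if w0 is not None:
--             index.setdefault(args[0], []).append(w0)
--         if len(args) > 1 and args[1] != args[0] and secondary is not None:
--             index.setdefault(args[1], []).append(secondary)
--
--     result = []
--     for arg in Args:
--         if arg.startswith('_') or arg.startswith('u'):
--             continue
--         for w in index.get(arg, []):
--             if w not in result: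
--                 result.append(w)
--     return ','.join(result)
-- ===== Notes on version B (the rewrite author's own statement) =====
-- stated objective: faster
-- what changed: B builds an index of (argument, word) contributions from word_props in one pass and answers each Args element by a dictionary lookup, instead of A's rescanning the whole word_props list for every argument.
import Mathlib
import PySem

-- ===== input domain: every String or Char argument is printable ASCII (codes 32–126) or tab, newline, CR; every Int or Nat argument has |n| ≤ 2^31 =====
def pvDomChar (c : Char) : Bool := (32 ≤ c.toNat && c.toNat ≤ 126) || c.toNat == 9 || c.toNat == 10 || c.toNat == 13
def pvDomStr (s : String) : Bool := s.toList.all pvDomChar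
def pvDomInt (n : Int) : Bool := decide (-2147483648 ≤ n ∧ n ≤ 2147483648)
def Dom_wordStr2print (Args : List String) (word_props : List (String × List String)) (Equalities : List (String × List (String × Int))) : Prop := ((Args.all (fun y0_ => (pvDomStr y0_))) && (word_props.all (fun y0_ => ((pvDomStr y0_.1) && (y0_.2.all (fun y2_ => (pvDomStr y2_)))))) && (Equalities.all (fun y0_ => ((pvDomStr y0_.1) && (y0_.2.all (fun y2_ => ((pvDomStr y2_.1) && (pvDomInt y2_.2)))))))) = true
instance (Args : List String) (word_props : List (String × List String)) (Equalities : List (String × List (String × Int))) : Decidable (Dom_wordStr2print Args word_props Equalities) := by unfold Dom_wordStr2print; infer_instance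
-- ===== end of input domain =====

-- B indexes the word contributions of word_props once instead of A's per-argument rescans;
-- return values agree on Pre_ (where Python A does not raise).

-- ===== PORT A =====
-- Python's 'if w not in ws: ws.append(w)' (both versions' dedup step)
def pvIns (ws : List String) (w : String) : List String :=
  if w ∈ ws then ws else ws ++ [w]

-- transliteration of find_words (wordStr2print calls it with is_mapping=False)
def find_words (ARG : String) (word_props : List (String × List String))
    (Equalities : List (String × List (String × Int))) (is_mapping : Bool) : List String :=
  let all_args : List String :=
    (if is_mapping && (PySem.Dict.mk Equalities).contains ARG then
      (match (PySem.Dict.mk Equalities).get? ARG with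
       | some inner => (PySem.Dict.mk inner).keys
       | none => [])
     else []) ++ [ARG]
  let words : List String :=
    all_args.foldl (fun words arg =>
      if ¬ PySem.Str.startswith arg "_" = true ∧ ¬ PySem.Str.startswith arg "u" = true then
        word_props.foldl (fun words p =>
          if PySem.List.pyGet? p.2 0 = some arg ∧
             (PySem.Str.endswith p.1 "-vb" || PySem.Str.endswith p.1 "-rb" ||
              PySem.Str.endswith p.1 "-adj" || PySem.Str.endswith p.1 "-nn") = true then
            if PySem.Str.endswith p.1 "-adj" = true then
              pvIns words (PySem.Str.slice p.1 none (some (-4)))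
            else
              pvIns words (PySem.Str.slice p.1 none (some (-3)))
          else if 1 < p.2.length ∧ PySem.List.pyGet? p.2 1 = some arg then
            if PySem.Str.endswith p.1 "-nn" = true then
              pvIns words (PySem.Str.slice p.1 none (some (-3)))
            else if p.1 = "person" then
              pvIns words "person"
            else words
          else words) words
      else words) []
  if words.length = 0 ∧ is_mapping = true then [ARG] else words

def wordStr2print (Args : List String) (word_props : List (String × List String)) (Equalities : List (String × List (String × Int))) : String :=
  let words : List String :=
    Args.foldl (fun words arg => (find_words arg word_props Equalities false).foldl pvIns words) []
  let output_str : String := words.foldl (fun s w => s ++ w ++ ",") ""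
  if 0 < PySem.Str.len output_str then PySem.Str.slice output_str none (some (-1)) else ""

-- ===== PORT B =====
-- the (argument, word) contributions of one property, in the order A's scan meets them
def pvEntries (p : String × List String) : List (String × String) :=
  match p.2 with
  | [] => []
  | a0 :: rest =>
    let stem : Option String :=
      if PySem.Str.endswith p.1 "-adj" = true then some (PySem.Str.slice p.1 none (some (-4)))
      else if (PySem.Str.endswith p.1 "-vb" || PySem.Str.endswith p.1 "-rb" ||
               PySem.Str.endswith p.1 "-nn") = true then some (PySem.Str.slice p.1 none (some (-3)))
      else none
    let secondary : Option String :=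
      if PySem.Str.endswith p.1 "-nn" = true then some (PySem.Str.slice p.1 none (some (-3)))
      else if p.1 = "person" then some "person"
      else none
    let w0 : Option String :=
      match stem with
      | some w => some w
      | none => match rest with
                | a1 :: _ => if a1 = a0 then secondary else none
                | [] => none
    (match w0 with | some w => [(a0, w)] | none => []) ++
    (match rest with
     | a1 :: _ =>
        if a1 ≠ a0 then (match secondary with | some w => [(a1, w)] | none => []) else []
     | [] => [])

def wordStr2print_alt (Args : List String) (word_props : List (String × List String)) (Equalities : List (String × List (String × Int))) : String :=
  let pairs : List (String × String) := word_props.foldl (fun acc p => acc ++ pvEntries p) []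
  let index : PySem.Dict String (List String) :=
    pairs.foldl (fun d q => d.modify q.1 [] (· ++ [q.2])) PySem.Dict.empty
  let result : List String :=
    Args.foldl (fun result arg =>
      if PySem.Str.startswith arg "_" || PySem.Str.startswith arg "u" then result
      else (index.getD arg []).foldl pvIns result) []
  PySem.Str.join "," result

-- ===== PRECONDITION & SPEC =====
-- Pre_ excludes exactly the inputs on which Python A raises IndexError: some word property
-- has an empty argument list and it is reached because some element of Args escapes the
-- '_'/'u' prefix filter.
def Pre_wordStr2print (Args : List String) (word_props : List (String × List String)) (Equalities : List (String × List (String × Int))) : Prop :=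
  (∃ a ∈ Args, ¬ PySem.Str.startswith a "_" = true ∧ ¬ PySem.Str.startswith a "u" = true) →
    ∀ p ∈ word_props, p.2 ≠ []
instance (Args : List String) (word_props : List (String × List String)) (Equalities : List (String × List (String × Int))) : Decidable (Pre_wordStr2print Args word_props Equalities) := by unfold Pre_wordStr2print; infer_instance
def pvWitness_wordStr2print : List String × (List (String × List String)) × (List (String × List (String × Int))) :=
  (["a", "_x"], [("run-vb", ["a"]), ("dog-nn", ["b", "a"])], [])

def Spec_wordStr2print (Args : List String) (word_props : List (String × List String)) (Equalities : List (String × List (String × Int))) (out : String) : Prop := out = wordStr2print_alt Args word_props Equalities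
instance (Args : List String) (word_props : List (String × List String)) (Equalities : List (String × List (String × Int))) (out : String) : Decidable (Spec_wordStr2print Args word_props Equalities out) := by unfold Spec_wordStr2print; infer_instance

-- ===== CLAIM (what is proved, stated in full; the proofs are below) =====
def Claim_equal_wordStr2print : Prop := ∀ (Args : List String) (word_props : List (String × List String)) (Equalities : List (String × List (String × Int))), Dom_wordStr2print Args word_props Equalities → Pre_wordStr2print Args word_props Equalities → Spec_wordStr2print Args word_props Equalities (wordStr2print Args word_props Equalities)


-- ===== LEMMAS AND PROOFS =====

-- the word A's inner scan contributes for arg at one property (none = no word)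
def pvContrib (arg : String) (p : String × List String) : Option String :=
  if PySem.List.pyGet? p.2 0 = some arg ∧
     (PySem.Str.endswith p.1 "-vb" || PySem.Str.endswith p.1 "-rb" ||
      PySem.Str.endswith p.1 "-adj" || PySem.Str.endswith p.1 "-nn") = true then
    if PySem.Str.endswith p.1 "-adj" = true then some (PySem.Str.slice p.1 none (some (-4)))
    else some (PySem.Str.slice p.1 none (some (-3)))
  else if 1 < p.2.length ∧ PySem.List.pyGet? p.2 1 = some arg then
    if PySem.Str.endswith p.1 "-nn" = true then some (PySem.Str.slice p.1 none (some (-3)))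
    else if p.1 = "person" then some "person"
    else none
  else none

def pvStream (arg : String) (word_props : List (String × List String)) : List String :=
  word_props.flatMap (fun p => (pvContrib arg p).toList)

lemma pv_mem_foldIns (l : List String) : ∀ (ws : List String) (x : String),
    x ∈ l.foldl pvIns ws ↔ x ∈ ws ∨ x ∈ l := by
  induction l with
  | nil => simp
  | cons a l ih =>
    intro ws x
    simp only [List.foldl_cons, ih, pvIns]
    by_cases h : a ∈ ws <;> simp [h] <;> by_cases hx : x = a <;> simp [hx] <;> tauto

lemma pv_foldIns_pvIns (ws us : List String) (a : String) :
    (pvIns us a).foldl pvIns ws = pvIns (us.foldl pvIns ws) a := by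
  by_cases h : a ∈ us
  · have e1 : pvIns us a = us := by simp [pvIns, h]
    have h2 : a ∈ us.foldl pvIns ws := (pv_mem_foldIns us ws a).mpr (Or.inr h)
    have e2 : pvIns (us.foldl pvIns ws) a = us.foldl pvIns ws := by simp [pvIns, h2]
    rw [e1, e2]
  · have e1 : pvIns us a = us ++ [a] := by simp [pvIns, h]
    rw [e1, List.foldl_append]
    rfl

lemma pv_foldIns_foldIns (l : List String) : ∀ (us ws : List String),
    (l.foldl pvIns us).foldl pvIns ws = l.foldl pvIns (us.foldl pvIns ws) := by
  induction l with
  | nil => intro us ws; rfl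
  | cons a l ih =>
    intro us ws
    simp only [List.foldl_cons]
    rw [ih (pvIns us a) ws, pv_foldIns_pvIns]

lemma pv_dedup_absorb (l ws : List String) :
    (l.foldl pvIns []).foldl pvIns ws = l.foldl pvIns ws := by
  rw [pv_foldIns_foldIns]
  rfl

lemma pv_foldA_eq (arg : String) (word_props : List (String × List String)) :
    ∀ (ws : List String),
    word_props.foldl (fun words p =>
      if PySem.List.pyGet? p.2 0 = some arg ∧
         (PySem.Str.endswith p.1 "-vb" || PySem.Str.endswith p.1 "-rb" ||
          PySem.Str.endswith p.1 "-adj" || PySem.Str.endswith p.1 "-nn") = true then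
        if PySem.Str.endswith p.1 "-adj" = true then
          pvIns words (PySem.Str.slice p.1 none (some (-4)))
        else
          pvIns words (PySem.Str.slice p.1 none (some (-3)))
      else if 1 < p.2.length ∧ PySem.List.pyGet? p.2 1 = some arg then
        if PySem.Str.endswith p.1 "-nn" = true then
          pvIns words (PySem.Str.slice p.1 none (some (-3)))
        else if p.1 = "person" then
          pvIns words "person"
        else words
      else words) ws
    = (pvStream arg word_props).foldl pvIns ws := by
  induction word_props with
  | nil => intro ws; rfl
  | cons p ps ih =>
    intro ws
    simp only [List.foldl_cons, pvStream, List.flatMap_cons, List.foldl_append]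
    rw [ih]
    congr 1
    unfold pvContrib
    split_ifs <;> rfl

lemma pv_find_words_eq (arg : String) (word_props : List (String × List String))
    (Equalities : List (String × List (String × Int))) :
    find_words arg word_props Equalities false =
      (if ¬ PySem.Str.startswith arg "_" = true ∧ ¬ PySem.Str.startswith arg "u" = true then
        (pvStream arg word_props).foldl pvIns [] else []) := by
  unfold find_words
  simp only [Bool.false_and, Bool.false_eq_true, if_false, List.nil_append, List.foldl_cons,
    List.foldl_nil, and_false, if_false]
  split_ifs with h
  · rw [pv_foldA_eq]
  · rfl

set_option maxHeartbeats 1600000 in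
lemma pv_entries_filter (arg : String) (p : String × List String) :
    ((pvEntries p).filter (fun q => q.1 == arg)).map (fun q => q.2) = (pvContrib arg p).toList := by
  obtain ⟨pn, args⟩ := p
  cases args with
  | nil => simp [pvEntries, pvContrib, PySem.List.pyGet?, PySem.List.pyIdx?]
  | cons a0 rest =>
    have hg0 : PySem.List.pyGet? (a0 :: rest) 0 = some a0 := by
      simp [PySem.List.pyGet?, PySem.List.pyIdx?]
    cases rest with
    | nil =>
      simp only [pvEntries, pvContrib, hg0]
      by_cases hadj : PySem.Str.endswith pn "-adj" = true <;>
      by_cases hvb : PySem.Str.endswith pn "-vb" = true <;>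
      by_cases hrb : PySem.Str.endswith pn "-rb" = true <;>
      by_cases hnn : PySem.Str.endswith pn "-nn" = true <;>
      by_cases ha0 : a0 = arg <;>
        simp_all [List.length]
    | cons a1 t =>
      have hg1 : PySem.List.pyGet? (a0 :: a1 :: t) 1 = some a1 := by
        simp [PySem.List.pyGet?, PySem.List.pyIdx?]
      have hlen2 : 1 < (a0 :: a1 :: t).length := by simp
      simp only [pvEntries, pvContrib, hg0, hg1, hlen2, true_and]
      by_cases hadj : PySem.Str.endswith pn "-adj" = true <;>
      by_cases hvb : PySem.Str.endswith pn "-vb" = true <;>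
      by_cases hrb : PySem.Str.endswith pn "-rb" = true <;>
      by_cases hnn : PySem.Str.endswith pn "-nn" = true <;>
      by_cases hper : pn = "person" <;>
      by_cases ha0 : a0 = arg <;>
      by_cases ha1 : a1 = arg <;>
      by_cases heq : a1 = a0 <;>
        simp_all
 
lemma pv_filter_flatMap (arg : String) (l : List (String × List String)) :
    ((l.flatMap pvEntries).filter (fun q => q.1 == arg)).map (fun q => q.2)
      = pvStream arg l := by
  induction l with
  | nil => rfl
  | cons p l ih =>
    simp only [List.flatMap_cons, List.filter_append, List.map_append, ih, pvStream]
    simp only [pvStream] at ih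
    rw [pv_entries_filter]

lemma pv_index_getD (word_props : List (String × List String)) (arg : String) :
    ((word_props.foldl (fun acc p => acc ++ pvEntries p) []).foldl
        (fun d q => d.modify q.1 [] (· ++ [q.2])) PySem.Dict.empty).getD arg []
      = pvStream arg word_props := by
  rw [PySem.List.foldl_append_eq_flatMap, List.nil_append,
    PySem.Dict.getD_foldl_modify_append]
  rw [PySem.Dict.getD_empty, List.nil_append]
  exact pv_filter_flatMap arg word_props

lemma pv_result_eq (word_props : List (String × List String))
    (Equalities : List (String × List (String × Int))) (Args : List String) :
    ∀ (ws : List String),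
    Args.foldl (fun words arg => (find_words arg word_props Equalities false).foldl pvIns words) ws
    = Args.foldl (fun result arg =>
        if PySem.Str.startswith arg "_" || PySem.Str.startswith arg "u" then result
        else (pvStream arg word_props).foldl pvIns result) ws := by
  induction Args with
  | nil => intro ws; rfl
  | cons a t ih =>
    intro ws
    simp only [List.foldl_cons]
    rw [ih]
    congr 1
    rw [pv_find_words_eq]
    by_cases h : ¬ PySem.Str.startswith a "_" = true ∧ ¬ PySem.Str.startswith a "u" = true
    · rw [if_pos h, pv_dedup_absorb]
      have h1 : PySem.Str.startswith a "_" = false := by simpa using h.1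
      have h2 : PySem.Str.startswith a "u" = false := by simpa using h.2
      rw [h1, h2]
      simp
    · rw [if_neg h]
      have hb : (PySem.Str.startswith a "_" || PySem.Str.startswith a "u") = true := by
        rcases not_and_or.mp h with h1 | h1 <;> simp at h1 <;> simp [h1]
      rw [hb]
      rfl

lemma pv_foldComma_toList (ws : List String) : ∀ (s : String),
    (ws.foldl (fun s w => s ++ w ++ ",") s).toList
      = s.toList ++ ws.flatMap (fun w => w.toList ++ [',']) := by
  induction ws with
  | nil => intro s; simp
  | cons w t ih =>
    intro s
    simp only [List.foldl_cons, List.flatMap_cons, ih, String.toList_append,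
      show ("," : String).toList = [','] from rfl]
    simp

lemma pv_flatMap_dropLast (ws : List String) (h : ws ≠ []) :
    (ws.flatMap (fun w => w.toList ++ [','])).dropLast
      = PySem.Chars.join [','] (ws.map String.toList) := by
  induction ws with
  | nil => simp at h
  | cons w t ih =>
    cases t with
    | nil => simp [PySem.Chars.join_singleton]
    | cons w2 t2 =>
      have hne : ((w2 :: t2).flatMap (fun w => w.toList ++ [','])) ≠ [] := by
        simp [List.flatMap_cons]
      calc ((w :: w2 :: t2).flatMap (fun w => w.toList ++ [','])).dropLast
          = ((w.toList ++ [',']) ++ (w2 :: t2).flatMap (fun w => w.toList ++ [','])).dropLast := by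
            simp [List.flatMap_cons]
        _ = (w.toList ++ [',']) ++ ((w2 :: t2).flatMap (fun w => w.toList ++ [','])).dropLast := by
            rw [List.dropLast_append_of_ne_nil hne]
        _ = (w.toList ++ [',']) ++ PySem.Chars.join [','] ((w2 :: t2).map String.toList) := by
            rw [ih (by simp)]
        _ = PySem.Chars.join [','] ((w :: w2 :: t2).map String.toList) := by
            simp [PySem.Chars.join_cons_cons, List.append_assoc]

lemma pv_output_eq (ws : List String) :
    (if 0 < PySem.Str.len (ws.foldl (fun s w => s ++ w ++ ",") "") then
       PySem.Str.slice (ws.foldl (fun s w => s ++ w ++ ",") "") none (some (-1)) else "")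
    = PySem.Str.join "," ws := by
  cases ws with
  | nil =>
    simp [PySem.Str.len_eq, PySem.Str.join, PySem.Chars.join_nil]
  | cons w t =>
    have htl := pv_foldComma_toList (w :: t) ""
    have hlen : 0 < PySem.Str.len ((w :: t).foldl (fun s w => s ++ w ++ ",") "") := by
      rw [PySem.Str.len_eq, htl]
      have h0 : ("" : String).toList = [] := rfl
      rw [h0, List.nil_append, List.flatMap_cons]
      have hpos : 0 < ((w.toList ++ [',']) ++ List.flatMap (fun w => w.toList ++ [',']) t).length := by
        simp only [List.length_append, List.length_cons, List.length_nil]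
        omega
      exact_mod_cast hpos
    rw [if_pos hlen]
    apply String.toList_inj.mp
    rw [PySem.Str.slice_to_neg_one, htl]
    have h0 : ("" : String).toList = [] := rfl
    rw [h0, List.nil_append, pv_flatMap_dropLast _ (by simp)]
    simp [PySem.Str.join, String.toList_ofList]

lemma pv_main (Args : List String) (word_props : List (String × List String))
    (Equalities : List (String × List (String × Int))) :
    wordStr2print Args word_props Equalities = wordStr2print_alt Args word_props Equalities := by
  simp only [wordStr2print, wordStr2print_alt]
  simp only [pv_index_getD]
  rw [pv_result_eq word_props Equalities Args []]
  exact pv_output_eq _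

-- ===== VERDICT (by name: the statement is the Claim_ definition above) =====
theorem wordStr2print_spec : Claim_equal_wordStr2print := by
  intro Args word_props Equalities _ _
  unfold Spec_wordStr2print
  exact pv_main Args word_props Equalities
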